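-- pv_equiv track=rewrite | github.com/gitterra/mediabuyer_calls | tools/phone.py | num_spacer
-- ===== SOURCE A (Python) =====
-- def num_spacer(text):
--   for k in range(10):
--     for l in range(10):
--       done = True
--       while done:
--         if (str(k) + str(l)) in text:
--           text = text.replace(str(k) + str(l), str(k) + ' ' + str(l))
--         else: done = False
--   return text
-- ===== SOURCE B (Python) =====
-- def num_spacer(text):
--     # single left-to-right pass: insert one space between every two adjacent ASCII digits
--     out = []
--     prev_digit = False
--     for ch in text:
--         d = '0' <= ch <= '9'
--         if prev_digit and d:
--             out.append(' ')
--         out.append(ch)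
--         prev_digit = d
--     return ''.join(out)
-- ===== Notes on version B (the rewrite author's own statement) =====
-- stated objective: simpler
-- what changed: Replaced the 100-pair nested replace-to-fixpoint loops by a single left-to-right pass that inserts a space wherever two adjacent characters are both ASCII digits.
import Mathlib
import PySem

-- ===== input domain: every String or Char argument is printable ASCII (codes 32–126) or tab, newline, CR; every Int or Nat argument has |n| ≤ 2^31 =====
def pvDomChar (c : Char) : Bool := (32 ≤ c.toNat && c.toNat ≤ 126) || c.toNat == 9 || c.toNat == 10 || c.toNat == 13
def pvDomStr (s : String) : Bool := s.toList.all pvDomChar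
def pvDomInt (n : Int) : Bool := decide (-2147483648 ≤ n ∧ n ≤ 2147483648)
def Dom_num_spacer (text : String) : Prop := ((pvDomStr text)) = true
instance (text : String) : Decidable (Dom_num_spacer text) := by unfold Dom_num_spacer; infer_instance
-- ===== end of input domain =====

-- B replaces A's 100-pair replace-to-fixpoint loops by one left-to-right pass inserting a space between adjacent ASCII digits.

-- B: one left-to-right pass inserting a space between adjacent ASCII digits, replacing A's 100 replace-to-fixpoint loops (objective: simpler).

-- ===== PORT A =====
-- the 'while done:' loop: fuel (s.length + 1) is only a totality guard; the proof
-- shows the loop reaches its fixpoint (the 'else' branch) before the fuel runs out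
def numSpacerWhile (pat rep : List Char) : Nat → List Char → List Char
  | 0, s => s
  | fuel+1, s =>
    if PySem.Chars.isIn pat s then
      numSpacerWhile pat rep fuel (PySem.Chars.replace s pat rep)
    else s

def num_spacer (text : String) : String :=
  String.ofList <|
    (PySem.List.pyRange 0 10 1).foldl (fun t k =>
      (PySem.List.pyRange 0 10 1).foldl (fun t l =>
        numSpacerWhile ((PySem.Int.toStr k).toList ++ (PySem.Int.toStr l).toList)
          ((PySem.Int.toStr k).toList ++ [' '] ++ (PySem.Int.toStr l).toList)
          (t.length + 1) t) t) text.toList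

-- ===== PORT B =====
def num_spacer_alt (text : String) : String :=
  String.ofList
    (text.toList.foldl
      (fun (st : List Char × Bool) ch =>
        let d := decide ('0' ≤ ch) && decide (ch ≤ '9')
        ((if st.2 && d then st.1 ++ [' '] else st.1) ++ [ch], d))
      ([], false)).1

-- ===== PRECONDITION & SPEC =====
def Spec_num_spacer (text : String) (out : String) : Prop := out = num_spacer_alt text
instance (text : String) (out : String) : Decidable (Spec_num_spacer text out) := by unfold Spec_num_spacer; infer_instance

-- ===== CLAIM (what is proved, stated in full; the proofs are below) =====
def Claim_equal_num_spacer : Prop := ∀ (text : String), Dom_num_spacer text → Spec_num_spacer text (num_spacer text)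

-- ===== LEMMAS AND PROOFS =====

def isDig (c : Char) : Bool := decide ('0' ≤ c) && decide (c ≤ '9')

def repl (old new : List Char) : List Char → List Char
  | [] => []
  | c :: t =>
    if old.isPrefixOf (c :: t) then new ++ repl old new (t.drop (old.length - 1))
    else c :: repl old new t
  termination_by l => l.length
  decreasing_by
  · simp only [List.length_cons]
    have := @List.length_drop Char (old.length - 1) t
    omega
  · simp

lemma replace_go_spec (old new : List Char) (hold : old ≠ []) :
    ∀ fuel l acc, l.length ≤ fuel →
      PySem.Chars.replace.go old new fuel l acc = acc.reverse ++ repl old new l := by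
  intro fuel
  induction fuel with
  | zero =>
    intro l acc h
    have : l = [] := List.eq_nil_of_length_eq_zero (Nat.le_zero.mp h)
    subst this
    simp [PySem.Chars.replace.go, repl]
  | succ fuel ih =>
    intro l acc h
    cases l with
    | nil => simp [PySem.Chars.replace.go, repl]
    | cons c t =>
      rw [PySem.Chars.replace.go]
      by_cases hp : old.isPrefixOf (c :: t)
      · rw [if_pos hp]
        have hlen : old.length ≤ t.length + 1 := by
          have := List.IsPrefix.length_le (List.isPrefixOf_iff_prefix.mp hp)
          simpa using this
        have h1 : 1 ≤ old.length := by
          cases old with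
          | nil => exact absurd rfl hold
          | cons _ _ => simp
        have hdrop : List.drop old.length (c :: t) = t.drop (old.length - 1) := by
          cases old with
          | nil => exact absurd rfl hold
          | cons o os => simp
        rw [hdrop]
        rw [ih _ _ (by simp at h ⊢; omega)]
        rw [repl, if_pos hp]
        simp
      · rw [if_neg hp]
        rw [ih _ _ (by simp at h; omega)]
        rw [repl, if_neg hp]
        simp

lemma replace_eq (s old new : List Char) (hold : old ≠ []) :
    PySem.Chars.replace s old new = repl old new s := by
  rw [PySem.Chars.replace]
  rw [if_neg (by simpa using hold)]
  simpa using replace_go_spec old new hold s.length s [] le_rfl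

lemma pairRec {P : List Char → Prop} (h0 : P []) (h1 : ∀ c, P [c])
    (h2 : ∀ c d t, P t → P (d :: t) → P (c :: d :: t)) : ∀ s, P s := by
  intro s
  induction hn : s.length using Nat.strong_induction_on generalizing s with
  | _ n ih =>
    cases s with
    | nil => exact h0
    | cons c t =>
      cases t with
      | nil => exact h1 c
      | cons d t =>
        subst hn
        exact h2 c d t (ih t.length (by simp) t rfl) (ih (d :: t).length (by simp) (d :: t) rfl)

lemma repl_pair_nil (a b : Char) : repl [a, b] [a, ' ', b] [] = [] := by rw [repl]

lemma repl_pair_one (a b c : Char) : repl [a, b] [a, ' ', b] [c] = [c] := by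
  rw [repl]
  rw [if_neg (by simp [List.isPrefixOf])]
  rw [repl]

lemma repl_pair_two (a b c d : Char) (t : List Char) :
    repl [a, b] [a, ' ', b] (c :: d :: t) =
      if c = a ∧ d = b then a :: ' ' :: b :: repl [a, b] [a, ' ', b] t
      else c :: repl [a, b] [a, ' ', b] (d :: t) := by
  rw [repl]
  by_cases h : c = a ∧ d = b
  · obtain ⟨rfl, rfl⟩ := h
    rw [if_pos (by simp [List.isPrefixOf]), if_pos ⟨rfl, rfl⟩]
    simp
  · rw [if_neg (by simp [List.isPrefixOf]; rintro rfl rfl; exact h ⟨rfl, rfl⟩), if_neg h]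

lemma head?_repl (a b : Char) : ∀ s, (repl [a, b] [a, ' ', b] s).head? = s.head? := by
  refine pairRec ?_ ?_ ?_
  · simp [repl_pair_nil]
  · intro c; simp [repl_pair_one]
  · intro c d t _ _
    rw [repl_pair_two]
    by_cases h : c = a ∧ d = b
    · obtain ⟨rfl, rfl⟩ := h; simp
    · rw [if_neg h]; simp

def frec : Bool → List Char → List Char
  | _, [] => []
  | prev, c :: t => (if prev && isDig c then [' ', c] else [c]) ++ frec (isDig c) t

def dcount : List Char → Nat
  | [] => 0
  | [_] => 0
  | a :: b :: t => (if isDig a && isDig b then 1 else 0) + dcount (b :: t)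

lemma dcount_cons (c : Char) (u : List Char) :
    dcount (c :: u) = (match u.head? with
      | some b => if isDig c && isDig b then 1 else 0
      | none => 0) + dcount u := by
  cases u with
  | nil => simp [dcount]
  | cons b t => simp [dcount]

lemma dcount_cons_le (c : Char) {u v : List Char} (h : u.head? = v.head?)
    (h2 : dcount u ≤ dcount v) : dcount (c :: u) ≤ dcount (c :: v) := by
  rw [dcount_cons, dcount_cons, h]
  omega

lemma dcount_repl_le (a b : Char) : ∀ s, dcount (repl [a, b] [a, ' ', b] s) ≤ dcount s := by
  refine pairRec ?_ ?_ ?_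
  · simp [repl_pair_nil]
  · intro c; simp [repl_pair_one]
  · intro c d t iht ihdt
    rw [repl_pair_two]
    by_cases h : c = a ∧ d = b
    · rw [if_pos h, h.1, h.2]
      have hsp : isDig ' ' = false := by decide
      have e1 : dcount (a :: ' ' :: b :: repl [a, b] [a, ' ', b] t)
          = dcount (b :: repl [a, b] [a, ' ', b] t) := by
        simp [dcount, hsp]
      have e3 : dcount (b :: repl [a, b] [a, ' ', b] t) ≤ dcount (b :: t) :=
        dcount_cons_le b (head?_repl a b t) iht
      have e2 : dcount (a :: b :: t) = (if isDig a && isDig b then 1 else 0) + dcount (b :: t) := by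
        simp only [dcount]
      rw [e1, e2]
      omega
    · rw [if_neg h]
      exact dcount_cons_le c (head?_repl a b (d :: t)) ihdt

lemma dcount_repl_lt (a b : Char) (ha : isDig a) (hb : isDig b) :
    ∀ s, [a, b] <:+: s → dcount (repl [a, b] [a, ' ', b] s) < dcount s := by
  refine pairRec ?_ ?_ ?_
  · intro h; simp at h
  · intro c h
    rcases h with ⟨p, q, hpq⟩
    have := congrArg List.length hpq
    simp at this
    omega
  · intro c d t iht ihdt hin
    rw [repl_pair_two]
    by_cases h : c = a ∧ d = b
    · rw [if_pos h, h.1, h.2]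
      have hsp : isDig ' ' = false := by decide
      have e1 : dcount (a :: ' ' :: b :: repl [a, b] [a, ' ', b] t)
          = dcount (b :: repl [a, b] [a, ' ', b] t) := by
        simp [dcount, hsp]
      have e3 : dcount (b :: repl [a, b] [a, ' ', b] t) ≤ dcount (b :: t) :=
        dcount_cons_le b (head?_repl a b t) (dcount_repl_le a b t)
      have e2 : dcount (a :: b :: t) = (if isDig a && isDig b then 1 else 0) + dcount (b :: t) := by
        simp only [dcount]
      rw [e1, e2, if_pos (by simp [ha, hb])]
      omega
    · rw [if_neg h]
      have hin' : [a, b] <:+: d :: t := by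
        rcases (List.infix_cons_iff).mp hin with hpre | hinf
        · exfalso
          rcases hpre with ⟨r, hr⟩
          simp at hr
          exact h ⟨hr.1.symm, hr.2.1.symm⟩
        · exact hinf
      have := ihdt hin'
      rw [dcount_cons, dcount_cons, head?_repl]
      omega

lemma frec_repl (a b : Char) (ha : isDig a) (hb : isDig b) :
    ∀ s, ∀ prev, frec prev (repl [a, b] [a, ' ', b] s) = frec prev s := by
  refine pairRec ?_ ?_ ?_
  · intro prev; rw [repl_pair_nil]
  · intro c prev; rw [repl_pair_one]
  · intro c d t iht ihdt prev
    rw [repl_pair_two]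
    by_cases h : c = a ∧ d = b
    · rw [if_pos h, h.1, h.2]
      have hsp : isDig ' ' = false := by decide
      simp [frec, ha, hb, hsp, iht]
    · rw [if_neg h]
      simp [frec, ihdt]

lemma singleton_prefix_head (y : Char) (l : List Char) : [y] <+: l ↔ l.head? = some y := by
  cases l with
  | nil => simp
  | cons c t => simp [List.cons_prefix_cons, eq_comm]

lemma infix_repl (a b x y : Char) (hx : isDig x) (hy : isDig y) :
    ∀ s, [x, y] <:+: repl [a, b] [a, ' ', b] s → [x, y] <:+: s := by
  refine pairRec ?_ ?_ ?_
  · rw [repl_pair_nil]; exact fun h => h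
  · intro c; rw [repl_pair_one]; exact fun h => h
  · intro c d t iht ihdt hin
    rw [repl_pair_two] at hin
    by_cases h : c = a ∧ d = b
    · rw [if_pos h] at hin
      rw [h.1, h.2]
      rcases List.infix_cons_iff.mp hin with hpre | hin2
      · exfalso
        rcases (List.cons_prefix_cons.mp hpre) with ⟨_, hp2⟩
        rcases (List.cons_prefix_cons.mp hp2) with ⟨hy', _⟩
        rw [hy'] at hy
        exact absurd hy (by decide)
      · rcases List.infix_cons_iff.mp hin2 with hpre | hin3
        · exfalso
          rcases (List.cons_prefix_cons.mp hpre) with ⟨hx', _⟩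
          rw [hx'] at hx
          exact absurd hx (by decide)
        · rcases List.infix_cons_iff.mp hin3 with hpre | hin4
          · rcases (List.cons_prefix_cons.mp hpre) with ⟨hxb, hp2⟩
            have hhead : t.head? = some y := by
              rw [← head?_repl a b t, ← singleton_prefix_head]
              exact hp2
            cases t with
            | nil => simp at hhead
            | cons e u =>
              simp at hhead
              subst hhead
              exact ⟨[a], u, by simp [hxb]⟩
          · exact List.infix_cons (List.infix_cons (iht hin4))
    · rw [if_neg h] at hin
      rcases List.infix_cons_iff.mp hin with hpre | hin2
      · rcases (List.cons_prefix_cons.mp hpre) with ⟨hxc, hp2⟩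
        have hhead : (d :: t).head? = some y := by
          rw [← head?_repl a b (d :: t), ← singleton_prefix_head]
          exact hp2
        simp at hhead
        subst hhead
        exact ⟨[], t, by simp [hxc]⟩
      · exact List.infix_cons (ihdt hin2)

lemma dcount_le_length : ∀ s : List Char, dcount s ≤ s.length := by
  refine pairRec ?_ ?_ ?_
  · simp [dcount]
  · intro c; simp [dcount]
  · intro c d t _ ih
    rw [dcount]
    simp only [List.length_cons] at *
    split_ifs <;> omega


lemma while_frec (a b : Char) (ha : isDig a) (hb : isDig b) :
    ∀ fuel s prev, frec prev (numSpacerWhile [a, b] [a, ' ', b] fuel s) = frec prev s := by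
  intro fuel
  induction fuel with
  | zero => intro s prev; rfl
  | succ fuel ih =>
    intro s prev
    rw [numSpacerWhile]
    by_cases hc : PySem.Chars.isIn [a, b] s = true
    · rw [if_pos hc, ih, replace_eq _ _ _ (by simp), frec_repl a b ha hb]
    · rw [if_neg hc]

lemma while_kills (a b : Char) (ha : isDig a) (hb : isDig b) :
    ∀ fuel s, dcount s < fuel →
      ¬ [a, b] <:+: numSpacerWhile [a, b] [a, ' ', b] fuel s := by
  intro fuel
  induction fuel with
  | zero => intro s h; omega
  | succ fuel ih =>
    intro s h
    rw [numSpacerWhile]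
    by_cases hc : PySem.Chars.isIn [a, b] s = true
    · rw [if_pos hc]
      have hinf : [a, b] <:+: s := (PySem.Chars.isIn_iff_infix _ _).mp hc
      apply ih
      rw [replace_eq _ _ _ (by simp)]
      have := dcount_repl_lt a b ha hb s hinf
      omega
    · rw [if_neg hc]
      exact (PySem.Chars.isIn_eq_false_iff _ _).mp (Bool.not_eq_true _ ▸ hc)

lemma while_preserves (a b x y : Char) (hx : isDig x) (hy : isDig y) :
    ∀ fuel s, ¬ [x, y] <:+: s → ¬ [x, y] <:+: numSpacerWhile [a, b] [a, ' ', b] fuel s := by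
  intro fuel
  induction fuel with
  | zero => intro s h; exact h
  | succ fuel ih =>
    intro s h
    rw [numSpacerWhile]
    by_cases hc : PySem.Chars.isIn [a, b] s = true
    · rw [if_pos hc]
      apply ih
      rw [replace_eq _ _ _ (by simp)]
      intro hcon
      exact h (infix_repl a b x y hx hy s hcon)
    · rw [if_neg hc]; exact h

lemma frec_of_dcount_zero :
    ∀ s : List Char, dcount s = 0 →
      ∀ prev : Bool, (∀ c, s.head? = some c → (prev && isDig c) = false) →
        frec prev s = s := by
  intro s
  induction s with
  | nil => intro _ _ _; rfl
  | cons c t ih =>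
    intro hd prev hh
    have hbit : (prev && isDig c) = false := hh c rfl
    rw [frec, hbit]
    simp only [if_false, Bool.false_eq_true]
    rw [dcount_cons] at hd
    have hdt : dcount t = 0 := by omega
    rw [ih hdt (isDig c) ?_]
    · simp
    · intro e he
      rw [he] at hd
      simp at hd
      by_cases h1 : isDig c
      · by_cases h2 : isDig e
        · exact absurd (hd.1) (by simp [h1, h2])
        · simp [h2]
      · simp [h1]

lemma dcount_ne_zero (s : List Char) (h : dcount s ≠ 0) :
    ∃ x y, isDig x ∧ isDig y ∧ [x, y] <:+: s := by
  induction s with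
  | nil => simp [dcount] at h
  | cons c t ih =>
    cases t with
    | nil => simp [dcount] at h
    | cons d u =>
      rw [dcount] at h
      by_cases hb : isDig c && isDig d
      · exact ⟨c, d, (Bool.and_eq_true_iff.mp hb).1, (Bool.and_eq_true_iff.mp hb).2, ⟨[], u, by simp⟩⟩
      · rw [if_neg hb] at h
        simp at h
        obtain ⟨x, y, hx, hy, hin⟩ := ih (by omega)
        exact ⟨x, y, hx, hy, List.infix_cons hin⟩


lemma char_eq_of_toNat (a b : Char) (h : a.val.toNat = b.val.toNat) : a = b := by
  apply Char.ext
  apply UInt32.toNat_inj.mp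
  omega

lemma digit_eq (a : Char) (ha : isDig a = true) :
    a ∈ ['0','1','2','3','4','5','6','7','8','9'] := by
  simp only [isDig, Bool.and_eq_true, decide_eq_true_eq] at ha
  obtain ⟨h0, h9⟩ := ha
  rw [Char.le_def, UInt32.le_iff_toNat_le] at h0 h9
  have e0 : ('0' : Char).val.toNat = 48 := by decide
  have e9 : ('9' : Char).val.toNat = 57 := by decide
  rw [e0] at h0; rw [e9] at h9
  have hv : a.val.toNat = 48 ∨ a.val.toNat = 49 ∨ a.val.toNat = 50 ∨ a.val.toNat = 51 ∨
      a.val.toNat = 52 ∨ a.val.toNat = 53 ∨ a.val.toNat = 54 ∨ a.val.toNat = 55 ∨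
      a.val.toNat = 56 ∨ a.val.toNat = 57 := by omega
  rcases hv with h|h|h|h|h|h|h|h|h|h
  · simp [char_eq_of_toNat a '0' (by rw [h]; decide)]
  · simp [char_eq_of_toNat a '1' (by rw [h]; decide)]
  · simp [char_eq_of_toNat a '2' (by rw [h]; decide)]
  · simp [char_eq_of_toNat a '3' (by rw [h]; decide)]
  · simp [char_eq_of_toNat a '4' (by rw [h]; decide)]
  · simp [char_eq_of_toNat a '5' (by rw [h]; decide)]
  · simp [char_eq_of_toNat a '6' (by rw [h]; decide)]
  · simp [char_eq_of_toNat a '7' (by rw [h]; decide)]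
  · simp [char_eq_of_toNat a '8' (by rw [h]; decide)]
  · simp [char_eq_of_toNat a '9' (by rw [h]; decide)]



def goodInt (k : Int) : Prop := ∃ a, isDig a ∧ (PySem.Int.toStr k).toList = [a]

lemma good_mem : ∀ k ∈ ([0,1,2,3,4,5,6,7,8,9] : List Int), goodInt k := by
  intro k hk
  fin_cases hk
  · exact ⟨'0', by decide, by decide⟩
  · exact ⟨'1', by decide, by decide⟩
  · exact ⟨'2', by decide, by decide⟩
  · exact ⟨'3', by decide, by decide⟩
  · exact ⟨'4', by decide, by decide⟩
  · exact ⟨'5', by decide, by decide⟩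
  · exact ⟨'6', by decide, by decide⟩
  · exact ⟨'7', by decide, by decide⟩
  · exact ⟨'8', by decide, by decide⟩
  · exact ⟨'9', by decide, by decide⟩

lemma digit_to_int (a : Char) (ha : isDig a = true) :
    ∃ k ∈ ([0,1,2,3,4,5,6,7,8,9] : List Int), (PySem.Int.toStr k).toList = [a] := by
  have := digit_eq a ha
  fin_cases this
  · exact ⟨0, by decide, by decide⟩
  · exact ⟨1, by decide, by decide⟩
  · exact ⟨2, by decide, by decide⟩
  · exact ⟨3, by decide, by decide⟩
  · exact ⟨4, by decide, by decide⟩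
  · exact ⟨5, by decide, by decide⟩
  · exact ⟨6, by decide, by decide⟩
  · exact ⟨7, by decide, by decide⟩
  · exact ⟨8, by decide, by decide⟩
  · exact ⟨9, by decide, by decide⟩

-- one iteration of the inner loop body, as the port writes it
def stageFn (k l : Int) (t : List Char) : List Char :=
  numSpacerWhile ((PySem.Int.toStr k).toList ++ (PySem.Int.toStr l).toList)
    ((PySem.Int.toStr k).toList ++ [' '] ++ (PySem.Int.toStr l).toList)
    (t.length + 1) t

lemma stage_frec (k l : Int) (hk : goodInt k) (hl : goodInt l) (t : List Char) (prev : Bool) :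
    frec prev (stageFn k l t) = frec prev t := by
  obtain ⟨a, ha, hka⟩ := hk
  obtain ⟨b, hb, hlb⟩ := hl
  rw [stageFn, hka, hlb]
  exact while_frec a b ha hb (t.length + 1) t prev

lemma stage_kills (k l : Int) (hk : goodInt k) (hl : goodInt l) (t : List Char) :
    ¬ ((PySem.Int.toStr k).toList ++ (PySem.Int.toStr l).toList) <:+: stageFn k l t := by
  obtain ⟨a, ha, hka⟩ := hk
  obtain ⟨b, hb, hlb⟩ := hl
  rw [stageFn, hka, hlb]
  exact while_kills a b ha hb (t.length + 1) t (by have := dcount_le_length t; omega)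

lemma stage_preserves (k l : Int) (hk : goodInt k) (hl : goodInt l) (x y : Char)
    (hx : isDig x) (hy : isDig y) (t : List Char) (h : ¬ [x, y] <:+: t) :
    ¬ [x, y] <:+: stageFn k l t := by
  obtain ⟨a, ha, hka⟩ := hk
  obtain ⟨b, hb, hlb⟩ := hl
  rw [stageFn, hka, hlb]
  exact while_preserves a b x y hx hy (t.length + 1) t h

-- inner loop over ls, then outer loop over ks
lemma inner_frec (k : Int) (hk : goodInt k) :
    ∀ (ls : List Int), (∀ l ∈ ls, goodInt l) → ∀ t prev,
      frec prev (ls.foldl (fun t l => stageFn k l t) t) = frec prev t := by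
  intro ls
  induction ls with
  | nil => intro _ t prev; rfl
  | cons l rest ih =>
    intro hg t prev
    rw [List.foldl_cons, ih (fun x hx => hg x (List.mem_cons_of_mem _ hx)),
      stage_frec k l hk (hg l List.mem_cons_self)]

lemma inner_preserves (k : Int) (hk : goodInt k) (x y : Char) (hx : isDig x) (hy : isDig y) :
    ∀ (ls : List Int), (∀ l ∈ ls, goodInt l) → ∀ t, ¬ [x, y] <:+: t →
      ¬ [x, y] <:+: ls.foldl (fun t l => stageFn k l t) t := by
  intro ls
  induction ls with
  | nil => intro _ t h; exact h
  | cons l rest ih =>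
    intro hg t h
    rw [List.foldl_cons]
    exact ih (fun z hz => hg z (List.mem_cons_of_mem _ hz)) _
      (stage_preserves k l hk (hg l List.mem_cons_self) x y hx hy t h)

lemma inner_kills (k : Int) (hk : goodInt k) :
    ∀ (ls : List Int), (∀ l ∈ ls, goodInt l) → ∀ t, ∀ l0 ∈ ls,
      ¬ ((PySem.Int.toStr k).toList ++ (PySem.Int.toStr l0).toList) <:+:
        ls.foldl (fun t l => stageFn k l t) t := by
  intro ls
  induction ls with
  | nil => intro _ t l0 h; simp at h
  | cons l rest ih =>
    intro hg t l0 hl0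
    rw [List.foldl_cons]
    rcases List.mem_cons.mp hl0 with rfl | hmem
    · obtain ⟨a, ha, hka⟩ := id hk
      obtain ⟨b, hb, hlb⟩ := hg l0 List.mem_cons_self
      have hkill := stage_kills k l0 hk (hg l0 List.mem_cons_self) t
      rw [hka, hlb] at hkill ⊢
      exact inner_preserves k hk a b ha hb rest
        (fun z hz => hg z (List.mem_cons_of_mem _ hz)) _ hkill
    · exact ih (fun z hz => hg z (List.mem_cons_of_mem _ hz)) _ l0 hmem

def innerFold (ls : List Int) (t : List Char) (k : Int) : List Char :=
  ls.foldl (fun t l => stageFn k l t) t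

lemma outer_frec (ls : List Int) (hls : ∀ l ∈ ls, goodInt l) :
    ∀ (ks : List Int), (∀ k ∈ ks, goodInt k) → ∀ t prev,
      frec prev (ks.foldl (innerFold ls) t) = frec prev t := by
  intro ks
  induction ks with
  | nil => intro _ t prev; rfl
  | cons k rest ih =>
    intro hg t prev
    rw [List.foldl_cons, ih (fun z hz => hg z (List.mem_cons_of_mem _ hz)),
      innerFold, inner_frec k (hg k List.mem_cons_self) ls hls]

lemma outer_preserves (ls : List Int) (hls : ∀ l ∈ ls, goodInt l) (x y : Char)
    (hx : isDig x) (hy : isDig y) :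
    ∀ (ks : List Int), (∀ k ∈ ks, goodInt k) → ∀ t, ¬ [x, y] <:+: t →
      ¬ [x, y] <:+: ks.foldl (innerFold ls) t := by
  intro ks
  induction ks with
  | nil => intro _ t h; exact h
  | cons k rest ih =>
    intro hg t h
    rw [List.foldl_cons]
    exact ih (fun z hz => hg z (List.mem_cons_of_mem _ hz)) _
      (inner_preserves k (hg k List.mem_cons_self) x y hx hy ls hls t h)

lemma outer_kills (ls : List Int) (hls : ∀ l ∈ ls, goodInt l) :
    ∀ (ks : List Int), (∀ k ∈ ks, goodInt k) → ∀ t, ∀ k0 ∈ ks, ∀ l0 ∈ ls,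
      ¬ ((PySem.Int.toStr k0).toList ++ (PySem.Int.toStr l0).toList) <:+:
        ks.foldl (innerFold ls) t := by
  intro ks
  induction ks with
  | nil => intro _ t k0 h; simp at h
  | cons k rest ih =>
    intro hg t k0 hk0 l0 hl0
    rw [List.foldl_cons]
    rcases List.mem_cons.mp hk0 with rfl | hmem
    · obtain ⟨a, ha, hka⟩ := hg k0 List.mem_cons_self
      obtain ⟨b, hb, hlb⟩ := hls l0 hl0
      have hkill := inner_kills k0 (hg k0 List.mem_cons_self) ls hls t l0 hl0
      rw [hka, hlb] at hkill ⊢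
      exact outer_preserves ls hls a b ha hb rest
        (fun z hz => hg z (List.mem_cons_of_mem _ hz)) _ hkill
    · exact ih (fun z hz => hg z (List.mem_cons_of_mem _ hz)) _ k0 hmem l0 hl0

lemma foldB (cs : List Char) :
    ∀ acc prev,
      (cs.foldl (fun (st : List Char × Bool) ch =>
        ((if st.2 && (decide ('0' ≤ ch) && decide (ch ≤ '9')) then st.1 ++ [' '] else st.1) ++ [ch],
          decide ('0' ≤ ch) && decide (ch ≤ '9'))) (acc, prev)).1 = acc ++ frec prev cs := by
  induction cs with
  | nil => intro acc prev; simp [frec]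
  | cons c t ih =>
    intro acc prev
    rw [List.foldl_cons, ih, frec]
    by_cases h : (prev && (decide ('0' ≤ c) && decide (c ≤ '9'))) = true
    · simp [isDig, h]
    · simp [isDig, h]

theorem num_spacer_eq_alt (text : String) : num_spacer text = num_spacer_alt text := by
  have hrange : PySem.List.pyRange 0 10 1 = ([0,1,2,3,4,5,6,7,8,9] : List Int) := by decide
  have hA : num_spacer text =
      String.ofList (([0,1,2,3,4,5,6,7,8,9] : List Int).foldl
        (innerFold [0,1,2,3,4,5,6,7,8,9]) text.toList) := by
    rw [num_spacer, hrange]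
    rfl
  have hB : num_spacer_alt text = String.ofList (frec false text.toList) := by
    rw [num_spacer_alt]
    congr 1
    have := foldB text.toList [] false
    simpa using this
  have hfrec : frec false (([0,1,2,3,4,5,6,7,8,9] : List Int).foldl
      (innerFold [0,1,2,3,4,5,6,7,8,9]) text.toList) = frec false text.toList :=
    outer_frec _ good_mem _ good_mem text.toList false
  have hkills := outer_kills ([0,1,2,3,4,5,6,7,8,9] : List Int) good_mem
    ([0,1,2,3,4,5,6,7,8,9] : List Int) good_mem text.toList
  rw [hA, hB]
  generalize hT : (([0,1,2,3,4,5,6,7,8,9] : List Int).foldl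
    (innerFold [0,1,2,3,4,5,6,7,8,9]) text.toList) = T at hfrec hkills
  have hdz : dcount T = 0 := by
    by_contra hdz
    obtain ⟨x, y, hx, hy, hin⟩ := dcount_ne_zero T hdz
    obtain ⟨k, hk, hka⟩ := digit_to_int x hx
    obtain ⟨l, hl, hlb⟩ := digit_to_int y hy
    have hk2 := hkills k hk l hl
    rw [hka, hlb] at hk2
    exact hk2 (by simpa using hin)
  have hfix : frec false T = T :=
    frec_of_dcount_zero T hdz false (by intro c _; simp)
  rw [← hfrec, hfix]

-- ===== VERDICT (by name: the statement is the Claim_ definition above) =====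
theorem num_spacer_spec : Claim_equal_num_spacer := by
  intro text _
  unfold Spec_num_spacer
  exact num_spacer_eq_alt text
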